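-- pv_equiv track=rewrite | github.com/venkateshrachapudi/llmextraction | llm_pdf_extractor.py | _extract_strings_from_TJ_array
-- ===== SOURCE A (Python) =====
-- def _extract_strings_from_TJ_array(arr: str) -> str:
--     """Extract contiguous text from a PDF TJ array operand [ (a) 120 (b) ] TJ (simplified)."""
--     out = []
--     i, n = 0, len(arr)
--     while i < n:
--         if arr[i] == '(':
--             i += 1
--             buf = []
--             depth = 1
--             esc = False
--             while i < n and depth > 0:
--                 c = arr[i]
--                 if esc:
--                     buf.append(c)
--                     esc = False
--                 else:
--                     if c == '\\':
--                         esc = True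
--                     elif c == '(':
--                         depth += 1
--                         buf.append(c)
--                     elif c == ')':
--                         depth -= 1
--                         if depth == 0:
--                             break
--                         buf.append(c)
--                     else:
--                         buf.append(c)
--                 i += 1
--             out.append(''.join(buf))
--         else:
--             i += 1
--     return ''.join(out)
-- ===== SOURCE B (Python) =====
-- def _next_special(arr: str, i: int, n: int):
--     """Index of the first '\\', '(' or ')' at or after i (n if none)."""
--     nxt = n
--     for ch in '\\()':
--         k = arr.find(ch, i, nxt)
--         if k >= 0:
--             nxt = k
--     return nxt
--
--
-- def _extract_strings_from_TJ_array(arr: str) -> str: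
--     """Extract contiguous text from a PDF TJ array operand [ (a) 120 (b) ] TJ (simplified)."""
--     out = []
--     pos, n = 0, len(arr)
--     while True:
--         start = arr.find('(', pos)
--         if start < 0:
--             break
--         parts, depth, i = [], 1, start + 1
--         while True:
--             j = _next_special(arr, i, n)
--             parts.append(arr[i:j])
--             if j >= n:
--                 i = n
--                 break
--             c = arr[j]
--             if c == '\\':
--                 if j + 1 >= n:
--                     i = n
--                     break
--                 parts.append(arr[j + 1])
--                 i = j + 2
--             elif c == '(':
--                 depth += 1
--                 parts.append('(')
--                 i = j + 1
--             else:
--                 depth -= 1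
--                 i = j + 1
--                 if depth == 0:
--                     break
--                 parts.append(')')
--         out.append(''.join(parts))
--         pos = i
--     return ''.join(out)
-- ===== Notes on version B (the rewrite author's own statement) =====
-- stated objective: faster
-- what changed: Instead of A's per-character nested-loop state machine, B jumps between delimiters with str.find and copies whole slices between them, handling only the delimiter characters individually.
import Mathlib
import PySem

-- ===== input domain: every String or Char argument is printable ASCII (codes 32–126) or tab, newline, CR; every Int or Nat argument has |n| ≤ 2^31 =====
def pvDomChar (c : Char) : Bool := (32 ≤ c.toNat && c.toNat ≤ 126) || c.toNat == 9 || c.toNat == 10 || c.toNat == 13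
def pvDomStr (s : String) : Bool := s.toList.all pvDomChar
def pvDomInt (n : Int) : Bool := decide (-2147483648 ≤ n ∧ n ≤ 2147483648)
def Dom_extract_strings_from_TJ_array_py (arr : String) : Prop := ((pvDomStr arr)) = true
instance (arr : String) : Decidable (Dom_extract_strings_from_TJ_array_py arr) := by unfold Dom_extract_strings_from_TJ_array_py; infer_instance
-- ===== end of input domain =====

-- B replaces A's per-character state machine by delimiter jumping: it locates the next
-- delimiter with str.find and copies whole slices between them (objective: faster, by the
-- timing run's measurement; the mechanism is C-level find/slicing instead of a Python-level
-- loop over every character).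

-- ===== PORT A =====
-- Inner while loop of A: scans from the char after '(', returns (buf, remaining input).
-- Python's `break` leaves i at the closing ')' and the outer loop's else then does i += 1,
-- so at depth 0 we return the input after the ')' (same values, step for step).
def pvAInner : List Char → List Char → Int → Bool → (List Char × List Char)
  | [], buf, _, _ => (buf, [])
  | c :: rest, buf, depth, esc =>
    if esc then pvAInner rest (buf ++ [c]) depth false
    else if c = '\\' then pvAInner rest buf depth true
    else if c = '(' then pvAInner rest (buf ++ [c]) (depth + 1) esc
    else if c = ')' then
      if depth - 1 = 0 then (buf, rest)
      else pvAInner rest (buf ++ [c]) (depth - 1) esc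
    else pvAInner rest (buf ++ [c]) depth esc

theorem pvAInner_snd_le (l : List Char) : ∀ buf d e, (pvAInner l buf d e).2.length ≤ l.length := by
  induction l with
  | nil => intro buf d e; simp [pvAInner]
  | cons c rest ih =>
    intro buf d e
    simp only [pvAInner]
    split_ifs <;> simp <;> exact Nat.le_succ_of_le (ih _ _ _)

-- Outer while loop of A: collects the extracted strings (''.join at the end = flatten).
def pvAOuter : List Char → List (List Char)
  | [] => []
  | c :: rest =>
    if c = '(' then
      let r := pvAInner rest [] 1 false
      r.1 :: pvAOuter r.2
    else pvAOuter rest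
termination_by l => l.length
decreasing_by
  · exact Nat.lt_succ_of_le (pvAInner_snd_le rest [] 1 false)
  · simp

def extract_strings_from_TJ_array_py (arr : String) : String :=
  String.ofList (pvAOuter arr.toList).flatten

-- ===== PORT B =====
-- Python str.find(c, i, e) for nonnegative bounds: absolute index of the first
-- occurrence of c in arr[i:e], -1 if none (exact for 0 ≤ i, 0 ≤ e).
def pvFind (l : List Char) (c : Char) (i e : Nat) : Int :=
  match ((l.take e).drop i).findIdx? (· = c) with
  | some k => ((i + k : Nat) : Int)
  | none => -1

-- _next_special of Source B: its for-loop over the three delimiter chars, as a foldl.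
def pvNextSpecial (l : List Char) (i n : Nat) : Nat :=
  ['\\', '(', ')'].foldl
    (fun nxt ch => let k := pvFind l ch i nxt; if 0 ≤ k then k.toNat else nxt) n

-- Inner while loop of Source B: jump to the next delimiter, append the slice arr[i:j],
-- then handle the delimiter; returns (parts, final i). The fuel argument is only a
-- structural totality guard: each iteration advances i, so fuel n+1 is never exhausted.
def pvBInner (l : List Char) (n : Nat) : Nat → Nat → Int → List (List Char) → List (List Char) × Nat
  | 0, i, _, parts => (parts, i)   -- unreachable with fuel ≥ n+1-i
  | fuel + 1, i, depth, parts =>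
    let j := pvNextSpecial l i n
    let parts1 := parts ++ [(l.drop i).take (j - i)]   -- arr[i:j], 0 ≤ i ≤ j
    if n ≤ j then (parts1, n)
    else
      let c := l.getD j ' '   -- arr[j], in range since j < n ≤ len
      if c = '\\' then
        if n ≤ j + 1 then (parts1, n)
        else pvBInner l n fuel (j + 2) depth (parts1 ++ [[l.getD (j + 1) ' ']])
      else if c = '(' then pvBInner l n fuel (j + 1) (depth + 1) (parts1 ++ [['(']])
      else
        if depth - 1 = 0 then (parts1, j + 1)
        else pvBInner l n fuel (j + 1) (depth - 1) (parts1 ++ [[')']])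

-- Outer while loop of Source B: find the next '(', run the inner loop, collect its join.
-- Again fuel is only a totality guard (the inner loop leaves i past the found '(').
def pvBOuter (l : List Char) (n : Nat) : Nat → Nat → List (List Char)
  | 0, _ => []   -- unreachable with fuel ≥ n+1-pos
  | fuel + 1, pos =>
    let start := pvFind l '(' pos n
    if start < 0 then []
    else
      let r := pvBInner l n (n + 1) (start.toNat + 1) 1 []
      r.1.flatten :: pvBOuter l n fuel r.2

def extract_strings_from_TJ_array_py_alt (arr : String) : String :=
  String.ofList
    (pvBOuter arr.toList arr.toList.length (arr.toList.length + 1) 0).flatten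

-- ===== PRECONDITION & SPEC =====
def Spec_extract_strings_from_TJ_array_py (arr : String) (out : String) : Prop := out = extract_strings_from_TJ_array_py_alt arr
instance (arr : String) (out : String) : Decidable (Spec_extract_strings_from_TJ_array_py arr out) := by unfold Spec_extract_strings_from_TJ_array_py; infer_instance

-- ===== CLAIM (what is proved, stated in full; the proofs are below) =====
def Claim_equal_extract_strings_from_TJ_array_py : Prop := ∀ (arr : String), Dom_extract_strings_from_TJ_array_py arr → Spec_extract_strings_from_TJ_array_py arr (extract_strings_from_TJ_array_py arr)

-- ===== LEMMAS AND PROOFS =====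

def pvSpecial (c : Char) : Prop := c = '\\' ∨ c = '(' ∨ c = ')'

-- full characterisation of pvFind (first match at or after i, nothing before)
theorem pvFind_spec (l : List Char) (c : Char) (i e : Nat) :
    (pvFind l c i e = -1 ∧ ∀ m, i ≤ m → m < e → m < l.length → l.getD m ' ' ≠ c)
  ∨ (∃ j : Nat, pvFind l c i e = (j : Int) ∧ i ≤ j ∧ j < e ∧ j < l.length ∧ l.getD j ' ' = c
      ∧ ∀ m, i ≤ m → m < j → l.getD m ' ' ≠ c) := by
  unfold pvFind
  cases hf : ((l.take e).drop i).findIdx? (· = c) with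
  | none =>
    left
    refine ⟨rfl, fun m him hme hml => ?_⟩
    rw [List.findIdx?_eq_none_iff] at hf
    have hm : m - i < ((l.take e).drop i).length := by
      simp only [List.length_drop, List.length_take]; omega
    have := hf (((l.take e).drop i)[m - i]) (List.getElem_mem hm)
    simp only [List.getElem_drop, List.getElem_take] at this
    rw [List.getD_eq_getElem l ' ' hml]
    have hmi : i + (m - i) = m := by omega
    simp only [hmi] at this
    simpa using this
  | some k =>
    right
    rcases List.findIdx?_eq_some_iff_getElem.mp hf with ⟨hlt, hk, hbefore⟩
    have hlen : ((l.take e).drop i).length = min e l.length - i := by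
      simp [List.length_drop, List.length_take]
    refine ⟨i + k, rfl, by omega, by omega, by omega, ?_, ?_⟩
    · simp only [List.getElem_drop, List.getElem_take] at hk
      rw [List.getD_eq_getElem l ' ' (by omega)]
      simpa using hk
    · intro m him hmk
      have hml : m < l.length := by omega
      have := hbefore (m - i) (by omega)
      simp only [List.getElem_drop, List.getElem_take] at this
      rw [List.getD_eq_getElem l ' ' hml]
      have hmi : i + (m - i) = m := by omega
      simp only [hmi] at this
      simpa using this

-- a next-special index below n lies at or after i
theorem pvNextSpecial_lt_ge (l : List Char) (i n : Nat)
    (h : pvNextSpecial l i n < n) : i ≤ pvNextSpecial l i n := by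
  have hge : ∀ (c : Char) (e : Nat), 0 ≤ pvFind l c i e → i ≤ (pvFind l c i e).toNat := by
    intro c e hc
    unfold pvFind at *
    cases hf : ((l.take e).drop i).findIdx? (· = c) <;> simp [hf] at hc ⊢; omega
  unfold pvNextSpecial at *
  simp only [List.foldl] at *
  split_ifs at * <;>
    first
      | omega
      | (exact hge _ _ (by assumption))

-- one step of _next_special's fold narrows the end bound to the first hit of one char
theorem pvStep_spec (l : List Char) (c : Char) (i e : Nat) (he : e ≤ l.length) :
    (if 0 ≤ pvFind l c i e then (pvFind l c i e).toNat else e) ≤ e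
    ∧ (∀ m, i ≤ m → m < (if 0 ≤ pvFind l c i e then (pvFind l c i e).toNat else e) → l.getD m ' ' ≠ c)
    ∧ ((if 0 ≤ pvFind l c i e then (pvFind l c i e).toNat else e) < e →
        l.getD (if 0 ≤ pvFind l c i e then (pvFind l c i e).toNat else e) ' ' = c
        ∧ i ≤ (if 0 ≤ pvFind l c i e then (pvFind l c i e).toNat else e)) := by
  rcases pvFind_spec l c i e with ⟨h1, h2⟩ | ⟨j, h1, h2, h3, h4, h5, h6⟩ <;> rw [h1]
  · simp only [if_neg (by omega : ¬ (0:Int) ≤ -1)]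
    exact ⟨le_rfl, fun m hm1 hm2 => h2 m hm1 hm2 (by omega), by omega⟩
  · simp only [if_pos (by omega : (0:Int) ≤ (j:Int)), Int.toNat_natCast]
    exact ⟨by omega, h6, fun _ => ⟨h5, h2⟩⟩

-- characterisation of _next_special: first delimiter at or after i, l.length if none
theorem pvNextSpecial_spec (l : List Char) (i : Nat) :
    pvNextSpecial l i l.length ≤ l.length
    ∧ (∀ m, i ≤ m → m < pvNextSpecial l i l.length → ¬ pvSpecial (l.getD m ' '))
    ∧ (pvNextSpecial l i l.length < l.length → pvSpecial (l.getD (pvNextSpecial l i l.length) ' ')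
        ∧ i ≤ pvNextSpecial l i l.length) := by
  have e0 : pvNextSpecial l i l.length =
      (let j1 := if 0 ≤ pvFind l '\\' i l.length then (pvFind l '\\' i l.length).toNat else l.length
       let j2 := if 0 ≤ pvFind l '(' i j1 then (pvFind l '(' i j1).toNat else j1
       if 0 ≤ pvFind l ')' i j2 then (pvFind l ')' i j2).toNat else j2) := rfl
  rw [e0]
  dsimp only
  set j1 := if 0 ≤ pvFind l '\\' i l.length then (pvFind l '\\' i l.length).toNat else l.length with hj1
  set j2 := if 0 ≤ pvFind l '(' i j1 then (pvFind l '(' i j1).toNat else j1 with hj2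
  set j3 := if 0 ≤ pvFind l ')' i j2 then (pvFind l ')' i j2).toNat else j2 with hj3
  obtain ⟨a1, a2, a3⟩ := pvStep_spec l '\\' i l.length le_rfl
  rw [← hj1] at a1 a2 a3
  obtain ⟨b1, b2, b3⟩ := pvStep_spec l '(' i j1 a1
  rw [← hj2] at b1 b2 b3
  obtain ⟨c1, c2, c3⟩ := pvStep_spec l ')' i j2 (le_trans b1 a1)
  rw [← hj3] at c1 c2 c3
  refine ⟨by omega, ?_, ?_⟩
  · intro m hm1 hm2
    rintro (h | h | h)
    · exact a2 m hm1 (by omega) h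
    · exact b2 m hm1 (by omega) h
    · exact c2 m hm1 hm2 h
  · intro hlt
    by_cases hc : j3 < j2
    · obtain ⟨h1, h2⟩ := c3 hc
      exact ⟨Or.inr (Or.inr h1), h2⟩
    · have hceq : j3 = j2 := le_antisymm c1 (by omega)
      rw [hceq]
      by_cases hb : j2 < j1
      · obtain ⟨h1, h2⟩ := b3 hb
        exact ⟨Or.inr (Or.inl h1), h2⟩
      · have hbeq : j2 = j1 := le_antisymm b1 (by omega)
        rw [hbeq]
        obtain ⟨h1, h2⟩ := a3 (by omega)
        exact ⟨Or.inl h1, h2⟩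

-- A's inner loop crosses a delimiter-free block by appending it wholesale
theorem pvAInner_run (l : List Char) (i j : Nat) (hj : j ≤ l.length) (hij : i ≤ j)
    (hns : ∀ m, i ≤ m → m < j → ¬ pvSpecial (l.getD m ' ')) (buf : List Char) (d : Int) :
    pvAInner (l.drop i) buf d false
      = pvAInner (l.drop j) (buf ++ (l.drop i).take (j - i)) d false := by
  by_cases h : i = j
  · subst h; simp
  · have hi : i < j := by omega
    have hlen : i < l.length := by omega
    have hnsi := hns i le_rfl hi
    rw [List.getD_eq_getElem l ' ' hlen] at hnsi
    simp only [pvSpecial, not_or] at hnsi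
    obtain ⟨h1, h2, h3⟩ := hnsi
    rw [List.drop_eq_getElem_cons hlen]
    simp only [pvAInner, Bool.false_eq_true, if_false, if_neg h1, if_neg h2, if_neg h3]
    rw [pvAInner_run l (i+1) j hj hi (fun m hm1 hm2 => hns m (by omega) hm2) (buf ++ [l[i]]) d]
    have hbufeq : (buf ++ [l[i]]) ++ (l.drop (i+1)).take (j - (i+1)) = buf ++ (l.drop i).take (j - i) := by
      rw [List.append_assoc]
      congr 1
      conv_rhs => rw [List.drop_eq_getElem_cons hlen]
      rw [show j - i = (j - (i+1)) + 1 by omega, List.take_succ_cons]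
      simp
    rw [hbufeq, ← List.drop_eq_getElem_cons hlen]
termination_by j - i

-- A's outer loop skips a '('-free block
theorem pvAOuter_run (l : List Char) (i j : Nat) (hj : j ≤ l.length) (hij : i ≤ j)
    (hns : ∀ m, i ≤ m → m < j → l.getD m ' ' ≠ '(') :
    pvAOuter (l.drop i) = pvAOuter (l.drop j) := by
  by_cases h : i = j
  · subst h; rfl
  · have hi : i < j := by omega
    have hlen : i < l.length := by omega
    have hnsi := hns i le_rfl hi
    rw [List.getD_eq_getElem l ' ' hlen] at hnsi
    rw [List.drop_eq_getElem_cons hlen]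
    rw [pvAOuter, if_neg hnsi]
    exact pvAOuter_run l (i+1) j hj hi (fun m hm1 hm2 => hns m (by omega) hm2)
termination_by j - i

-- bounds on the index returned by the inner loop
theorem pvBInner_snd (l : List Char) (n : Nat) (fuel i : Nat) (d : Int)
    (parts : List (List Char)) (hi : i ≤ n) :
    i ≤ (pvBInner l n fuel i d parts).2 ∧ (pvBInner l n fuel i d parts).2 ≤ n := by
  induction fuel generalizing i d parts with
  | zero => simp [pvBInner]; omega
  | succ fuel ih =>
    rw [pvBInner.eq_2 l n i d parts fuel]
    dsimp only
    by_cases hn : n ≤ pvNextSpecial l i n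
    · rw [if_pos hn]; exact ⟨hi, le_rfl⟩
    · have hij : i ≤ pvNextSpecial l i n := pvNextSpecial_lt_ge l i n (by omega)
      rw [if_neg hn]
      by_cases hc1 : l.getD (pvNextSpecial l i n) ' ' = '\\'
      · rw [if_pos hc1]
        by_cases hn1 : n ≤ pvNextSpecial l i n + 1
        · rw [if_pos hn1]; exact ⟨hi, le_rfl⟩
        · rw [if_neg hn1]
          have := ih (pvNextSpecial l i n + 2) d
            (parts ++ [(l.drop i).take (pvNextSpecial l i n - i)] ++ [[l.getD (pvNextSpecial l i n + 1) ' ']]) (by omega)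
          omega
      · rw [if_neg hc1]
        by_cases hc2 : l.getD (pvNextSpecial l i n) ' ' = '('
        · rw [if_pos hc2]
          have := ih (pvNextSpecial l i n + 1) (d + 1)
            (parts ++ [(l.drop i).take (pvNextSpecial l i n - i)] ++ [['(']]) (by omega)
          omega
        · rw [if_neg hc2]
          by_cases hd : d - 1 = 0
          · rw [if_pos hd]; exact ⟨by omega, by omega⟩
          · rw [if_neg hd]
            have := ih (pvNextSpecial l i n + 1) (d - 1)
              (parts ++ [(l.drop i).take (pvNextSpecial l i n - i)] ++ [[')']]) (by omega)
            omega

-- B's inner loop only appends to its parts accumulator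
theorem pvBInner_acc (l : List Char) (n fuel : Nat) (i : Nat) (d : Int) (q p : List (List Char)) :
    pvBInner l n fuel i d (p ++ q) = (p ++ (pvBInner l n fuel i d q).1, (pvBInner l n fuel i d q).2) := by
  induction fuel generalizing i d q p with
  | zero => simp [pvBInner]
  | succ fuel ih =>
    rw [pvBInner.eq_2 l n i d (p ++ q) fuel, pvBInner.eq_2 l n i d q fuel]
    dsimp only
    by_cases hn : n ≤ pvNextSpecial l i n
    · rw [if_pos hn, if_pos hn]; simp
    · rw [if_neg hn, if_neg hn]
      by_cases hc1 : l.getD (pvNextSpecial l i n) ' ' = '\\'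
      · rw [if_pos hc1, if_pos hc1]
        by_cases hn1 : n ≤ pvNextSpecial l i n + 1
        · rw [if_pos hn1, if_pos hn1]; simp
        · rw [if_neg hn1, if_neg hn1]
          rw [show (p ++ q) ++ [(l.drop i).take (pvNextSpecial l i n - i)] ++ [[l.getD (pvNextSpecial l i n + 1) ' ']]
                = p ++ (q ++ [(l.drop i).take (pvNextSpecial l i n - i)] ++ [[l.getD (pvNextSpecial l i n + 1) ' ']]) by simp]
          exact ih _ _ _ p
      · rw [if_neg hc1, if_neg hc1]
        by_cases hc2 : l.getD (pvNextSpecial l i n) ' ' = '('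
        · rw [if_pos hc2, if_pos hc2]
          rw [show (p ++ q) ++ [(l.drop i).take (pvNextSpecial l i n - i)] ++ [['(']]
                = p ++ (q ++ [(l.drop i).take (pvNextSpecial l i n - i)] ++ [['(']]) by simp]
          exact ih _ _ _ p
        · rw [if_neg hc2, if_neg hc2]
          by_cases hd : d - 1 = 0
          · rw [if_pos hd, if_pos hd]; simp
          · rw [if_neg hd, if_neg hd]
            rw [show (p ++ q) ++ [(l.drop i).take (pvNextSpecial l i n - i)] ++ [[')']]
                  = p ++ (q ++ [(l.drop i).take (pvNextSpecial l i n - i)] ++ [[')']]) by simp]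
            exact ih _ _ _ p

-- main inner correspondence: A's inner loop = flatten of B's inner parts, rest = drop of B's index
theorem pvB_inner_main (l : List Char) (fuel i : Nat) (d : Int) (buf : List Char)
    (hi : i ≤ l.length) (hfuel : l.length + 1 - i ≤ fuel) :
    pvAInner (l.drop i) buf d false
      = (buf ++ (pvBInner l l.length fuel i d []).1.flatten,
         l.drop (pvBInner l l.length fuel i d []).2) := by
  induction fuel generalizing i d buf with
  | zero => omega
  | succ fuel ih =>
    obtain ⟨hjn, hrun, hspec⟩ := pvNextSpecial_spec l i
    set j := pvNextSpecial l i l.length with hjdef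
    rw [pvBInner.eq_2 l l.length i d [] fuel]
    dsimp only
    rw [← hjdef]
    by_cases hn : l.length ≤ j
    · -- j = l.length: no delimiter left; A consumes everything into buf
      rw [if_pos hn]
      have hj : j = l.length := by omega
      rw [pvAInner_run l i l.length le_rfl hi (fun m h1 h2 => hrun m h1 (by omega)) buf d]
      simp [hj, pvAInner]
    · rw [if_neg hn]
      have hjl : j < l.length := by omega
      have hij' : i ≤ j := (hspec hjl).2
      have hstep := pvAInner_run l i j (by omega) hij' (fun m h1 h2 => hrun m h1 h2) buf d
      rw [hstep]
      set buf1 := buf ++ (l.drop i).take (j - i) with hbuf1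
      rw [List.drop_eq_getElem_cons hjl]
      rw [← List.getD_eq_getElem l ' ' hjl]
      set c := l.getD j ' ' with hcdef
      by_cases hc1 : c = '\\'
      · rw [if_pos hc1]
        -- A: set esc and continue from j+1
        simp only [pvAInner, Bool.false_eq_true, if_false, if_pos hc1]
        by_cases hn1 : l.length ≤ j + 1
        · rw [if_pos hn1]
          have : l.drop (j+1) = [] := List.drop_eq_nil_of_le (by omega)
          rw [this]
          simp [pvAInner, hbuf1]
        · rw [if_neg hn1]
          have hj1 : j + 1 < l.length := by omega
          rw [List.drop_eq_getElem_cons hj1]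
          simp only [pvAInner, if_true]
          rw [show j + 1 + 1 = j + 2 from rfl]
          rw [ih (j + 2) d (buf1 ++ [l[j+1]]) (by omega) (by omega)]
          have hacc := pvBInner_acc l l.length fuel (j+2) d []
            ([(l.drop i).take (j - i)] ++ [[l.getD (j+1) ' ']])
          rw [List.append_nil] at hacc
          simp only [List.nil_append]
          rw [hacc]
          simp [hbuf1, List.getElem?_eq_getElem hj1]
      · rw [if_neg hc1]
        by_cases hc2 : c = '('
        · rw [if_pos hc2]
          simp only [pvAInner, Bool.false_eq_true, if_false, if_neg hc1, if_pos hc2]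
          rw [ih (j + 1) (d + 1) (buf1 ++ [c]) (by omega) (by omega)]
          have hacc := pvBInner_acc l l.length fuel (j+1) (d+1) []
            ([(l.drop i).take (j - i)] ++ [['(']])
          rw [List.append_nil] at hacc
          simp only [List.nil_append]
          rw [hacc]
          simp [hbuf1, hc2]
        · rw [if_neg hc2]
          have hc3 : c = ')' := by
            have := (hspec hjl).1
            rcases this with h | h | h <;> simp_all [pvSpecial]
          by_cases hd : d - 1 = 0
          · rw [if_pos hd]
            simp only [pvAInner, Bool.false_eq_true, if_false, if_neg hc1, if_neg hc2, if_pos hc3, if_pos hd]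
            simp [hbuf1]
          · rw [if_neg hd]
            simp only [pvAInner, Bool.false_eq_true, if_false, if_neg hc1, if_neg hc2, if_pos hc3, if_neg hd]
            rw [ih (j + 1) (d - 1) (buf1 ++ [c]) (by omega) (by omega)]
            have hacc := pvBInner_acc l l.length fuel (j+1) (d-1) []
              ([(l.drop i).take (j - i)] ++ [[')']])
            rw [List.append_nil] at hacc
            simp only [List.nil_append]
            rw [hacc]
            simp [hbuf1, hc3]

-- main outer correspondence
theorem pvB_outer_main (l : List Char) (fuel pos : Nat)
    (hfuel : l.length + 1 - pos ≤ fuel) :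
    pvAOuter (l.drop pos) = pvBOuter l l.length fuel pos := by
  induction fuel generalizing pos with
  | zero =>
    have hp : l.length < pos := by omega
    rw [List.drop_eq_nil_of_le (by omega)]
    simp [pvBOuter, pvAOuter]
  | succ fuel ih =>
    rw [pvBOuter.eq_2]
    dsimp only
    rcases pvFind_spec l '(' pos l.length with ⟨h1, h2⟩ | ⟨s, h1, h2, h3, h4, h5, h6⟩
    · rw [h1]
      rw [if_pos (by omega)]
      by_cases hp : pos ≤ l.length
      · rw [pvAOuter_run l pos l.length le_rfl hp (fun m hm1 hm2 => h2 m hm1 hm2 (by omega))]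
        simp [pvAOuter]
      · rw [List.drop_eq_nil_of_le (by omega)]
        simp [pvAOuter]
    · rw [h1]
      rw [if_neg (by omega)]
      have hs : (s : Int).toNat = s := Int.toNat_natCast s
      rw [hs]
      -- A skips to position s, the first '('
      rw [pvAOuter_run l pos s (by omega) h2 h6]
      rw [List.drop_eq_getElem_cons h4]
      have hpar : l[s] = '(' := by rw [← List.getD_eq_getElem l ' ' h4]; exact h5
      rw [pvAOuter, if_pos hpar]
      dsimp only
      have hmain := pvB_inner_main l (l.length + 1) (s + 1) 1 [] (by omega) (by omega)
      rw [hmain]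
      have hsnd := pvBInner_snd l l.length (l.length + 1) (s + 1) 1 [] (by omega)
      rw [ih (pvBInner l l.length (l.length + 1) (s+1) 1 []).2 (by omega)]
      simp

-- ===== VERDICT (by name: the statement is the Claim_ definition above) =====
theorem extract_strings_from_TJ_array_py_spec : Claim_equal_extract_strings_from_TJ_array_py := by
  intro arr _
  unfold Spec_extract_strings_from_TJ_array_py extract_strings_from_TJ_array_py
    extract_strings_from_TJ_array_py_alt
  rw [← pvB_outer_main arr.toList (arr.toList.length + 1) 0 (by omega), List.drop_zero]
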